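-- pv_equiv track=rewrite | github.com/CS-CodingChallenge/TA-GCC-2019 | python/Question3.py | question03
-- ===== SOURCE A (Python) =====
-- def question03(scores, alice):
--     # modify and then return the variable below
--     ## only unique values
--     set_scores = set(scores)
--     ## sort them to get their rank which is the index+1
--     ranks = sorted(set_scores, reverse = True)
--     my_ranks = []
--     for a in alice:
--     	temp_list = ranks
--     	temp_list.append(a)
--     	temp_list = sorted(temp_list, reverse = True)
--     	index_of_a = temp_list.index(a)
--     	my_ranks.append(index_of_a+1)
--     ## find the mode
--     answer = max(set(my_ranks), key=my_ranks.count)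
--
--     return answer
-- ===== SOURCE B (Python) =====
-- def question03(scores, alice):
--     # One ascending leaderboard maintained by binary-search insertion:
--     # rank of a = (#entries strictly greater) + 1 = len(board) - bisect_right(board, a) + 1.
--     # (A instead appends to a shared list and re-sorts it descending every iteration.)
--     board = sorted(set(scores))
--     my_ranks = []
--     for a in alice:
--         lo, hi = 0, len(board)
--         while lo < hi:
--             mid = (lo + hi) // 2
--             if board[mid] <= a:
--                 lo = mid + 1
--             else:
--                 hi = mid
--         my_ranks.append(len(board) - lo + 1)
--         board.insert(lo, a)
--     counts = {}
--     for r in my_ranks: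
--         counts[r] = counts.get(r, 0) + 1
--     best = None
--     for r in set(my_ranks):
--         if best is None or counts[best] < counts[r]:
--             best = r
--     return best
-- ===== Notes on version B (the rewrite author's own statement) =====
-- stated objective: faster
-- what changed: B keeps one ascending leaderboard and computes each rank by a hand-written binary search (bisect_right) followed by a positional insert, instead of A's append-to-a-shared-list / full re-sort / .index per iteration, and picks the mode with a count dictionary built in one pass instead of calling my_ranks.count for every distinct rank.
import Mathlib
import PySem

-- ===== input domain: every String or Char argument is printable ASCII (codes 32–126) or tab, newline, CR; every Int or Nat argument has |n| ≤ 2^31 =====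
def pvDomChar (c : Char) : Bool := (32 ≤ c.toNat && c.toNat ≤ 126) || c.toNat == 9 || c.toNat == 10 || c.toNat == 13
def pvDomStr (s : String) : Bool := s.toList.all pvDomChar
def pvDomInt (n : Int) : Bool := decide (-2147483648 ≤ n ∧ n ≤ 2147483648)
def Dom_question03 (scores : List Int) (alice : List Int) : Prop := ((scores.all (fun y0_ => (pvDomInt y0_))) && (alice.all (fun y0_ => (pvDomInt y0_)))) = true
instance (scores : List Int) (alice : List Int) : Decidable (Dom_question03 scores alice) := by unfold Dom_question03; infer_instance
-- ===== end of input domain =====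

-- B replaces A's per-iteration append/re-sort/.index on a shared list by ONE ascending
-- leaderboard maintained with hand-written binary-search insertion, and the mode's
-- repeated my_ranks.count by a count dictionary built in one pass (objective: faster).

-- ===== PORT A =====
-- A-side model of CPython's iteration order over a set of small positive ints, tables as
-- Array (open addressing, LINEAR_PROBES = 9, perturb probing, growth ×4 at 3/5 load;
-- hash(n) = n for the positive ranks that occur here).  Both Pythons iterate
-- 'set(my_ranks)' to pick the mode, and on a count tie the winner depends on this order.
-- Empty slots hold 0 (every stored rank is ≥ 1).

-- scan slot i and then up to k following slots: empty → insert, equal → duplicate (some none)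
def pvScan (t : Array Int) (h : Int) : Nat → Nat → Option (Option (Array Int))
  | i, k =>
    if t.getD i 0 == 0 then some (some (t.setIfInBounds i h))
    else if t.getD i 0 == h then some none
    else match k with
      | 0 => none
      | k+1 => pvScan t h (i+1) k

-- probe loop of set_add_entry; the fuel only guards totality (an empty slot is always found)
def pvProbe (h : Int) : Nat → Array Int → Nat → Nat → Option (Array Int)
  | 0, t, _, _ => some t
  | f+1, t, i, pb =>
    match pvScan t h i (if i + 9 ≤ t.size - 1 then 9 else 0) with
    | some r => r
    | none => pvProbe h f t ((i*5+1+(pb >>> 5)) % t.size) (pb >>> 5)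

def pvIns (t : Array Int) (h : Int) : Option (Array Int) :=
  pvProbe h (t.size + 64) t (h.toNat % t.size) h.toNat

-- smallest power of two > minused, from 8 (set_table_resize); fuel 64 covers every size here
def pvGrow (minused : Nat) : Nat → Nat → Nat
  | 0, s => s
  | f+1, s => if s ≤ minused then pvGrow minused f (s*2) else s

-- rebuild: reinserting distinct absent elements never hits the duplicate or resize branch
def pvResize (t : Array Int) (used : Nat) : Array Int :=
  (t.toList.filter (fun h => h != 0)).foldl
    (fun acc h => (pvIns acc h).getD acc) (Array.replicate (pvGrow (used*4) 64 8) 0)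

def pvAddElt (st : Array Int × Nat) (h : Int) : Array Int × Nat :=
  match pvIns st.1 h with
  | none => st
  | some t =>
    let u := st.2 + 1
    if u * 5 ≥ (t.size - 1) * 3 then (pvResize t u, u) else (t, u)

-- iteration order of set(xs) in CPython: active slots of the final table, in slot order
def pysetOrder (xs : List Int) : List Int :=
  (xs.foldl pvAddElt (Array.replicate 8 0, 0)).1.toList.filter (fun h => h != 0)

-- loop body of A: temp_list aliases ranks, so the append lands in ranks and ranks keeps
-- every processed alice score; temp_list is then rebound to the sorted copy and
-- index_of_a read off it with .index (a ∈ temp_list always: .index never raises)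
def aStep : List Int × List Int → Int → List Int × List Int
  | (ranks, myRanks), a =>
    let tempList := ranks ++ [a]
    let tempSorted := PySem.List.sorted tempList (fun z => z) true
    let indexOfA := (PySem.List.index? tempSorted a).getD 0
    (tempList, myRanks ++ [(indexOfA : Int) + 1])

-- answer = max(set(my_ranks), key=my_ranks.count): Python's max re-runs my_ranks.count on
-- each candidate and keeps the FIRST set-order element whose count is strictly greater
def aMaxByCount (myRanks : List Int) : List Int → Int
  | [] => 0    -- max() of the empty set raises ValueError: outside Pre_
  | c :: cs =>
    (cs.foldl (fun (bk : Int × Int) y =>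
        if bk.2 < (PySem.List.count myRanks y : Int) then (y, (PySem.List.count myRanks y : Int)) else bk)
      (c, (PySem.List.count myRanks c : Int))).1

def question03 (scores : List Int) (alice : List Int) : Int :=
  let setScores := PySem.Set.ofList scores
  let ranks := PySem.List.sorted setScores (fun z => z) true
  let myRanks : List Int := []
  let fin := alice.foldl aStep (ranks, myRanks)
  let answer := aMaxByCount fin.2 (pysetOrder fin.2)
  answer

-- ===== PORT B =====
-- B's own copy of the CPython set-order model, carried over a plain List table (port A's
-- uses Array): same hash algorithm — the only shared definition is the pure size computation
-- pvGrow, and setIter_eq_pysetOrder below proves the two representations give one order.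

def hashScan (tbl : List Int) (h : Int) : Nat → Nat → Option (Option (List Int))
  | i, k =>
    if tbl.getD i 0 == 0 then some (some (tbl.set i h))
    else if tbl.getD i 0 == h then some none
    else match k with
      | 0 => none
      | k+1 => hashScan tbl h (i+1) k

def hashProbe (h : Int) : Nat → List Int → Nat → Nat → Option (List Int)
  | 0, tbl, _, _ => some tbl
  | f+1, tbl, i, pb =>
    match hashScan tbl h i (if i + 9 ≤ tbl.length - 1 then 9 else 0) with
    | some r => r
    | none => hashProbe h f tbl ((i*5+1+(pb >>> 5)) % tbl.length) (pb >>> 5)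

def hashInsert (tbl : List Int) (h : Int) : Option (List Int) :=
  hashProbe h (tbl.length + 64) tbl (h.toNat % tbl.length) h.toNat

def rebuild (tbl : List Int) (used : Nat) : List Int :=
  (tbl.filter (fun h => h != 0)).foldl
    (fun acc h => (hashInsert acc h).getD acc) (List.replicate (pvGrow (used*4) 64 8) 0)

def addHash (st : List Int × Nat) (h : Int) : List Int × Nat :=
  match hashInsert st.1 h with
  | none => st
  | some tbl =>
    let u := st.2 + 1
    if u * 5 ≥ (tbl.length - 1) * 3 then (rebuild tbl u, u) else (tbl, u)

-- iteration order of set(xs): active slots of the final table, in slot order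
def setIter (xs : List Int) : List Int :=
  (xs.foldl addHash (List.replicate 8 0, 0)).1.filter (fun h => h != 0)

-- Source B's hand-written while-loop (bisect_right): lo, hi stay ≥ 0 so '//' is Nat division,
-- and board[mid] is always in range (mid < hi ≤ len board), so getD is exact
def q3bSearch (board : List Int) (a : Int) (lo hi : Nat) : Nat :=
  if _hlt : lo < hi then
    if board.getD ((lo + hi) / 2) 0 ≤ a then q3bSearch board a ((lo + hi) / 2 + 1) hi
    else q3bSearch board a lo ((lo + hi) / 2)
  else lo
termination_by hi - lo
decreasing_by all_goals omega

-- loop body of B: rank from the ascending board, then binary-search insertion into it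
def bStep (st : List Int × List Int) (a : Int) : List Int × List Int :=
  let lo := q3bSearch st.1 a 0 st.1.length
  (PySem.List.insert st.1 (lo : Int) a, st.2 ++ [(st.1.length : Int) - (lo : Int) + 1])

def question03_alt (scores : List Int) (alice : List Int) : Int :=
  let fin := alice.foldl bStep (PySem.List.sorted (PySem.Set.ofList scores) (fun z => z) false, [])
  let counts := fin.2.foldl (fun (d : PySem.Dict Int Int) r => d.insert r (d.getD r 0 + 1)) PySem.Dict.empty
  -- best starts as None and is None at the end only when alice = [] (outside Pre_): getD 0 is a totality guard
  ((setIter fin.2).foldl (fun (best : Option Int) r =>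
      match best with
      | none => some r
      | some b => if counts.getD b 0 < counts.getD r 0 then some r else some b) none).getD 0

-- ===== PRECONDITION & SPEC =====
-- Pre_ excludes alice = [], on which A raises ValueError (max of an empty set); B returns None there.
def Pre_question03 (scores : List Int) (alice : List Int) : Prop := alice ≠ []
instance (scores : List Int) (alice : List Int) : Decidable (Pre_question03 scores alice) := by unfold Pre_question03; infer_instance
def pvWitness_question03 : List Int × List Int := ([1, 2], [1])
def Spec_question03 (scores : List Int) (alice : List Int) (out : Int) : Prop := out = question03_alt scores alice
instance (scores : List Int) (alice : List Int) (out : Int) : Decidable (Spec_question03 scores alice out) := by unfold Spec_question03; infer_instance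

-- ===== CLAIM (what is proved, stated in full; the proofs are below) =====
def Claim_equal_question03 : Prop := ∀ (scores : List Int) (alice : List Int), Dom_question03 scores alice → Pre_question03 scores alice → Spec_question03 scores alice (question03 scores alice)

-- ===== LEMMAS AND PROOFS =====

-- in a nonincreasing list, the first occurrence of a member a sits after exactly the elements > a
lemma index?_pairwise_ge (a : Int) : ∀ (s : List Int), s.Pairwise (fun p q => q ≤ p) → a ∈ s →
    PySem.List.index? s a = some (s.countP (fun x => decide (a < x)))
  | [], _, ha => absurd ha (List.not_mem_nil)
  | x :: xs, hp, ha => by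
    rcases List.pairwise_cons.mp hp with ⟨hx, hxs⟩
    by_cases hxa : x = a
    · subst hxa
      rw [PySem.List.index?_cons_self]
      have h0 : xs.countP (fun y => decide (x < y)) = 0 :=
        List.countP_eq_zero.mpr (fun y hy => by simpa using not_lt.mpr (hx y hy))
      simp [h0]
    · have ha' : a ∈ xs := by
        rcases List.mem_cons.mp ha with h | h
        · exact absurd h.symm hxa
        · exact h
      rw [PySem.List.index?_cons_of_ne _ hxa, index?_pairwise_ge a xs hxs ha']
      have hax : a < x := lt_of_le_of_ne (hx a ha') (fun h => hxa h.symm)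
      simp [hax]

-- .index(a) on sorted(l, reverse=True) counts the elements of l strictly greater than a
lemma index?_sortedDesc (l : List Int) (a : Int) (ha : a ∈ l) :
    PySem.List.index? (PySem.List.sorted l (fun z => z) true) a
      = some (l.countP (fun x => decide (a < x))) := by
  rw [index?_pairwise_ge a _ (by simpa using PySem.List.sorted_pairwise_rev l (fun z => z))
      ((PySem.List.mem_sorted l (fun z => z) true a).mpr ha),
    (PySem.List.sorted_perm l (fun z => z) true).countP_eq]

-- in a nondecreasing list, the elements ≤ a are exactly the prefix of length countP (· ≤ a)
lemma sorted_take_drop (a : Int) : ∀ (board : List Int), board.Pairwise (fun x y => x ≤ y) →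
    (∀ x ∈ board.take (board.countP (fun x => decide (x ≤ a))), x ≤ a) ∧
    (∀ x ∈ board.drop (board.countP (fun x => decide (x ≤ a))), a < x)
  | [], _ => by simp
  | b :: rest, hp => by
    rcases List.pairwise_cons.mp hp with ⟨hb, hrest⟩
    by_cases hba : b ≤ a
    · have ⟨ih1, ih2⟩ := sorted_take_drop a rest hrest
      refine ⟨?_, ?_⟩ <;> simp only [List.countP_cons, hba, decide_true]
      · intro x hx
        rcases List.mem_cons.mp hx with h | h
        · exact h ▸ hba
        · exact ih1 x h
      · exact ih2
    · have hab : a < b := not_le.mp hba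
      have h0 : rest.countP (fun x => decide (x ≤ a)) = 0 :=
        List.countP_eq_zero.mpr (fun y hy => by
          simpa using not_le.mpr (lt_of_lt_of_le hab (hb y hy)))
      refine ⟨?_, ?_⟩ <;> simp only [List.countP_cons, h0, hba, decide_false] <;> simp
      exact ⟨hab, fun x hx => lt_of_lt_of_le hab (hb x hx)⟩

-- the while-loop is bisect_right: on a sorted board it returns countP (· ≤ a)
lemma q3bSearch_spec (board : List Int) (a : Int) (hp : board.Pairwise (fun x y => x ≤ y)) :
    ∀ (n lo hi : Nat), hi - lo ≤ n → lo ≤ hi → hi ≤ board.length →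
    (∀ i, i < lo → i < board.length → board.getD i 0 ≤ a) →
    (∀ i, hi ≤ i → i < board.length → a < board.getD i 0) →
    q3bSearch board a lo hi = board.countP (fun x => decide (x ≤ a)) := by
  have hmono : ∀ i j, i ≤ j → j < board.length → board.getD i 0 ≤ board.getD j 0 := by
    intro i j hij hj
    rcases eq_or_lt_of_le hij with rfl | hlt
    · exact le_refl _
    · rw [List.getD_eq_getElem board 0 (by omega), List.getD_eq_getElem board 0 hj]
      exact (List.pairwise_iff_getElem.mp hp) i j (by omega) hj hlt
  intro n
  induction n with
  | zero =>
    intro lo hi hle hlh hhi hlow hhigh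
    have heq : lo = hi := by omega
    subst heq
    rw [q3bSearch, dif_neg (by omega)]
    have hlo : lo ≤ board.length := by omega
    conv_rhs => rw [← List.take_append_drop lo board, List.countP_append]
    have h1 : (board.take lo).countP (fun x => decide (x ≤ a)) = (board.take lo).length := by
      apply List.countP_eq_length.mpr
      intro x hx
      obtain ⟨i, hi', hxe⟩ := List.mem_iff_getElem.mp hx
      rw [List.length_take] at hi'
      have hia : i < board.length := by omega
      rw [List.getElem_take] at hxe
      have := hlow i (by omega) hia
      rw [List.getD_eq_getElem board 0 hia, hxe] at this
      simpa using this
    have h2 : (board.drop lo).countP (fun x => decide (x ≤ a)) = 0 := by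
      apply List.countP_eq_zero.mpr
      intro x hx
      obtain ⟨j, hj', hxe⟩ := List.mem_iff_getElem.mp hx
      rw [List.length_drop] at hj'
      have hja : lo + j < board.length := by omega
      rw [List.getElem_drop] at hxe
      have := hhigh (lo + j) (by omega) hja
      rw [List.getD_eq_getElem board 0 hja, hxe] at this
      simp only [decide_eq_true_eq, not_le]
      exact this
    rw [h1, h2, List.length_take]
    omega
  | succ n ih =>
    intro lo hi hle hlh hhi hlow hhigh
    by_cases hlt : lo < hi
    · have hmlen : (lo + hi) / 2 < board.length := by omega
      rw [q3bSearch, dif_pos hlt]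
      by_cases hcmp : board.getD ((lo + hi) / 2) 0 ≤ a
      · rw [if_pos hcmp]
        apply ih ((lo + hi) / 2 + 1) hi (by omega) (by omega) hhi
        · intro i hi' hilen
          exact le_trans (hmono i ((lo + hi) / 2) (by omega) hmlen) hcmp
        · exact hhigh
      · rw [if_neg hcmp]
        apply ih lo ((lo + hi) / 2) (by omega) (by omega) (by omega) hlow
        intro i hi' hilen
        exact lt_of_lt_of_le (not_le.mp hcmp) (hmono ((lo + hi) / 2) i hi' hilen)
    · exact ih lo hi (by omega) hlh hhi hlow hhigh

-- B's count dictionary looked up at r is my_ranks.count(r)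
lemma getD_counts (mr : List Int) (r : Int) :
    (mr.foldl (fun (d : PySem.Dict Int Int) r => d.insert r (d.getD r 0 + 1)) PySem.Dict.empty).getD r 0
      = (PySem.List.count mr r : Int) := by
  rw [PySem.Dict.foldl_insert_getD_add_one_eq_counter, PySem.Dict.getD_counter, PySem.List.count_eq]

-- the two loops produce the same my_ranks list
lemma fold_ranks (u : List Int) : ∀ (al seen out board : List Int),
    board.Pairwise (fun x y => x ≤ y) → board.Perm (u ++ seen) →
    (al.foldl aStep (PySem.List.sorted u (fun z => z) true ++ seen, out)).2
      = (al.foldl bStep (board, out)).2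
  | [], _, _, _, _, _ => rfl
  | a :: al, seen, out, board, hp, hperm => by
    have hmem : a ∈ (PySem.List.sorted u (fun z => z) true ++ seen) ++ [a] := by simp
    have hA : aStep (PySem.List.sorted u (fun z => z) true ++ seen, out) a
        = (PySem.List.sorted u (fun z => z) true ++ (seen ++ [a]),
           out ++ [((u.countP (fun s => decide (a < s))
                    + seen.countP (fun b => decide (a < b)) : Nat) : Int) + 1]) := by
      simp only [aStep]
      rw [index?_sortedDesc _ a hmem]
      simp [List.countP_append,
        (PySem.List.sorted_perm u (fun z => z) true).countP_eq, List.append_assoc]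
    -- B's binary search returns the number of board entries ≤ a
    have hlo : q3bSearch board a 0 board.length = board.countP (fun x => decide (x ≤ a)) :=
      q3bSearch_spec board a hp board.length 0 board.length (by omega) (by omega) (le_refl _)
        (fun i hi _ => absurd hi (Nat.not_lt_zero i)) (fun i hi hi' => absurd hi' (by omega))
    have hloLe : board.countP (fun x => decide (x ≤ a)) ≤ board.length := List.countP_le_length
    have hsplitP : board.countP (fun x => decide (x ≤ a))
        + board.countP (fun x => decide (a < x)) = board.length := by
      have h := List.length_eq_countP_add_countP (fun x => decide (x ≤ a)) (l := board)
      have hcg : board.countP (fun x => decide ¬(decide (x ≤ a) = true))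
          = board.countP (fun x => decide (a < x)) :=
        List.countP_congr (fun x _ => by
          by_cases hx : x ≤ a
          · simp [hx, not_lt.mpr hx]
          · simp [hx, not_le.mp hx])
      rw [hcg] at h
      omega
    have hgt : board.countP (fun x => decide (a < x))
        = u.countP (fun s => decide (a < s)) + seen.countP (fun b => decide (a < b)) := by
      rw [hperm.countP_eq, List.countP_append]
    have ⟨hTake, hDrop⟩ := sorted_take_drop a board hp
    have hB : bStep (board, out) a
        = (board.take (board.countP (fun x => decide (x ≤ a)))
             ++ a :: board.drop (board.countP (fun x => decide (x ≤ a))),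
           out ++ [((u.countP (fun s => decide (a < s))
                    + seen.countP (fun b => decide (a < b)) : Nat) : Int) + 1]) := by
      simp only [bStep, hlo]
      rw [PySem.List.insert_natCast board _ a hloLe]
      have h1 : ((board.length : Int) - ((board.countP (fun x => decide (x ≤ a)) : Nat) : Int) + 1)
          = ((u.countP (fun s => decide (a < s))
              + seen.countP (fun b => decide (a < b)) : Nat) : Int) + 1 := by
        rw [← hgt]
        omega
      rw [h1]
    rw [List.foldl_cons, List.foldl_cons, hA, hB]
    -- the inserted board is still sorted and still a permutation of u ++ processed prefix
    have hp' : (board.take (board.countP (fun x => decide (x ≤ a)))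
        ++ a :: board.drop (board.countP (fun x => decide (x ≤ a)))).Pairwise
          (fun x y => x ≤ y) := by
      apply List.pairwise_append.mpr
      refine ⟨List.Pairwise.sublist (List.take_sublist _ _) hp, ?_, ?_⟩
      · apply List.pairwise_cons.mpr
        exact ⟨fun y hy => le_of_lt (hDrop y hy),
          List.Pairwise.sublist (List.drop_sublist _ _) hp⟩
      · intro x hx y hy
        have hxa := hTake x hx
        rcases List.mem_cons.mp hy with rfl | hy'
        · exact hxa
        · exact le_trans hxa (le_of_lt (hDrop y hy'))
    have hperm' : (board.take (board.countP (fun x => decide (x ≤ a)))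
        ++ a :: board.drop (board.countP (fun x => decide (x ≤ a)))).Perm
          (u ++ (seen ++ [a])) := by
      have s1 : (board.take (board.countP (fun x => decide (x ≤ a)))
          ++ a :: board.drop (board.countP (fun x => decide (x ≤ a)))).Perm (a :: board) := by
        have h := List.perm_middle (a := a)
          (l₁ := board.take (board.countP (fun x => decide (x ≤ a))))
          (l₂ := board.drop (board.countP (fun x => decide (x ≤ a))))
        rwa [List.take_append_drop] at h
      have s2 : (a :: (u ++ seen)).Perm (u ++ (seen ++ [a])) := by
        rw [← List.append_assoc]
        exact (List.perm_append_singleton a (u ++ seen)).symm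
      exact s1.trans ((List.Perm.cons a hperm).trans s2)
    exact fold_ranks u al (seen ++ [a]) _ _ hp' hperm'

-- bridge: Array/List table reads agree
lemma getD_toList (t : Array Int) (i : Nat) (d : Int) : t.toList.getD i d = t.getD i d := by
  simp only [Array.getD, List.getD]
  split
  · next h => simp [Array.getElem?_eq_getElem h]
  · next h => rw [List.getElem?_eq_none (by simpa using by omega : t.toList.length ≤ i)]; rfl

-- B's List-table scan simulates A's Array-table scan
lemma hashScan_eq (h : Int) : ∀ (k i : Nat) (t : Array Int),
    hashScan t.toList h i k = (pvScan t h i k).map (Option.map Array.toList)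
  | 0, i, t => by
    rw [hashScan, pvScan]
    simp only [getD_toList]
    split_ifs <;> simp [Array.toList_setIfInBounds]
  | k+1, i, t => by
    rw [hashScan, pvScan]
    simp only [getD_toList]
    split_ifs <;> simp [Array.toList_setIfInBounds, hashScan_eq h k (i+1) t]

lemma hashProbe_eq (h : Int) : ∀ (f : Nat) (t : Array Int) (i pb : Nat),
    hashProbe h f t.toList i pb = (pvProbe h f t i pb).map Array.toList
  | 0, t, i, pb => rfl
  | f+1, t, i, pb => by
    rw [hashProbe, pvProbe]
    simp only [Array.length_toList, hashScan_eq h _ i t]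
    cases pvScan t h i (if i + 9 ≤ t.size - 1 then 9 else 0) with
    | none => exact hashProbe_eq h f t _ _
    | some r => cases r <;> rfl

lemma hashInsert_eq (t : Array Int) (h : Int) :
    hashInsert t.toList h = (pvIns t h).map Array.toList := by
  rw [hashInsert, pvIns, Array.length_toList, hashProbe_eq]

lemma insFold_eq (xs : List Int) : ∀ (t : Array Int),
    xs.foldl (fun acc h => (hashInsert acc h).getD acc) t.toList
      = (xs.foldl (fun acc h => (pvIns acc h).getD acc) t).toList := by
  induction xs with
  | nil => intro t; rfl
  | cons x xs ih =>
    intro t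
    simp only [List.foldl_cons, hashInsert_eq]
    cases hx : pvIns t x with
    | none => simpa [hx] using ih t
    | some t' => simpa [hx] using ih t'

lemma rebuild_eq (t : Array Int) (u : Nat) : rebuild t.toList u = (pvResize t u).toList := by
  rw [rebuild, pvResize, ← Array.toList_replicate, insFold_eq]

lemma addHash_eq (t : Array Int) (u : Nat) (h : Int) :
    addHash (t.toList, u) h = ((pvAddElt (t, u) h).1.toList, (pvAddElt (t, u) h).2) := by
  rw [addHash, pvAddElt]
  simp only [hashInsert_eq]
  cases hx : pvIns t h with
  | none => rfl
  | some t' =>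
    simp only [Option.map_some, Array.length_toList]
    split_ifs <;> simp [rebuild_eq]

-- the two representations of set(xs) produce the same iteration order
lemma setIter_eq_pysetOrder (xs : List Int) : setIter xs = pysetOrder xs := by
  rw [setIter, pysetOrder]
  have key : ∀ (t : Array Int) (u : Nat),
      xs.foldl addHash (t.toList, u)
        = ((xs.foldl pvAddElt (t, u)).1.toList, (xs.foldl pvAddElt (t, u)).2) := by
    induction xs with
    | nil => intro t u; rfl
    | cons x xs ih =>
      intro t u
      simp only [List.foldl_cons, addHash_eq]
      exact ih (pvAddElt (t, u) x).1 (pvAddElt (t, u) x).2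
  rw [← Array.toList_replicate, key]

-- B's Option-valued best-so-far loop is A's (value, key) fold
lemma mode_fold (key : Int → Int) : ∀ (cs : List Int) (b : Int),
    ((cs.foldl (fun (best : Option Int) r =>
        match best with
        | none => some r
        | some b0 => if key b0 < key r then some r else some b0) (some b))).getD 0
      = (cs.foldl (fun (bk : Int × Int) y =>
          if bk.2 < key y then (y, key y) else bk) (b, key b)).1
  | [], b => rfl
  | c :: cs, b => by
    simp only [List.foldl_cons]
    by_cases h : key b < key c
    · simp only [h, if_pos]
      exact mode_fold key cs c
    · simp only [h, if_false]
      exact mode_fold key cs b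

-- ===== VERDICT (by name: the statement is the Claim_ definition above) =====
theorem question03_spec : Claim_equal_question03 := by
  intro scores alice _ _
  unfold Spec_question03 question03 question03_alt
  have hmr : (alice.foldl aStep
        (PySem.List.sorted (PySem.Set.ofList scores) (fun z => z) true, ([] : List Int))).2
      = (alice.foldl bStep
        (PySem.List.sorted (PySem.Set.ofList scores) (fun z => z) false, ([] : List Int))).2 := by
    have := fold_ranks (PySem.Set.ofList scores) alice [] []
      (PySem.List.sorted (PySem.Set.ofList scores) (fun z => z) false)
      (by simpa using PySem.List.sorted_pairwise (PySem.Set.ofList scores) (fun z => z))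
      (by simpa using PySem.List.sorted_perm (PySem.Set.ofList scores) (fun z => z) false)
    simpa using this
  simp only [← hmr, getD_counts, setIter_eq_pysetOrder]
  cases hord : pysetOrder (alice.foldl aStep
      (PySem.List.sorted (PySem.Set.ofList scores) (fun z => z) true, ([] : List Int))).2 with
  | nil => simp [aMaxByCount]
  | cons c cs =>
    simp only [aMaxByCount, List.foldl_cons]
    exact (mode_fold _ cs c).symm
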